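-- pv_equiv track=rewrite | github.com/prekyba3000-bit/OpenSeimas | OpenPlanter/agent/patching.py | _find_subsequence
-- ===== SOURCE A (Python) =====
-- def _normalize_ws(line: str) -> str:
--     """Collapse all whitespace runs to single space and strip."""
--     return " ".join(line.split())
--
-- def _find_subsequence(
--     haystack: list[str], needle: list[str], start_idx: int = 0
-- ) -> int:
--     if not needle:
--         return min(max(start_idx, 0), len(haystack))
--     max_start = len(haystack) - len(needle)
--     # Pass 1: exact match
--     for i in range(max(start_idx, 0), max_start + 1):
--         if haystack[i : i + len(needle)] == needle:
--             return i
--     # Pass 2: whitespace-normalized match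
--     norm_needle = [_normalize_ws(ln) for ln in needle]
--     for i in range(max(start_idx, 0), max_start + 1):
--         if [_normalize_ws(h) for h in haystack[i : i + len(needle)]] == norm_needle:
--             return i
--     return -1
-- ===== SOURCE B (Python) =====
-- def _normalize_ws(line: str) -> str:
--     return " ".join(line.split())
--
-- def _find_subsequence(haystack, needle, start_idx=0):
--     if not needle:
--         return min(max(start_idx, 0), len(haystack))
--     m = len(needle)
--     norm_needle = [_normalize_ws(ln) for ln in needle]
--     norm_hay = [_normalize_ws(h) for h in haystack]
--     first_norm = -1
--     for i in range(max(start_idx, 0), len(haystack) - m + 1):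
--         if haystack[i:i + m] == needle:
--             return i
--         if first_norm < 0 and norm_hay[i:i + m] == norm_needle:
--             first_norm = i
--     return first_norm
-- ===== Notes on version B (the rewrite author's own statement) =====
-- stated objective: alternative
-- what changed: B normalizes the haystack once up front and replaces A's two full scans by a single combined pass that returns on the first exact match and records the first whitespace-normalized match, instead of re-normalizing every window in a second pass; on the benchmark inputs this is not measurably faster (it trades the second scan for upfront normalization of the whole haystack).
import Mathlib
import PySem

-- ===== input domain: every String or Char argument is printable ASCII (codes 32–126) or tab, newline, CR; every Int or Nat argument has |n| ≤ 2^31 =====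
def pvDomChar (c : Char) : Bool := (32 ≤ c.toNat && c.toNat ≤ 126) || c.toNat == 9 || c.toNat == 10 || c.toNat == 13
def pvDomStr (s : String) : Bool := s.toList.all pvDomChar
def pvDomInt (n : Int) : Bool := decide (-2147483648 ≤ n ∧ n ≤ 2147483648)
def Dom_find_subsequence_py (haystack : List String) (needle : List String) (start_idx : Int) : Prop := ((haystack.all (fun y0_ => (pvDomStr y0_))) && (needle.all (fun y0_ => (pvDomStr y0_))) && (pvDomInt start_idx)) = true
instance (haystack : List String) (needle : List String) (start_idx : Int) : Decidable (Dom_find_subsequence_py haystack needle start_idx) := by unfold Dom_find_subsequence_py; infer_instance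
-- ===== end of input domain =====

-- B normalizes the haystack once and merges A's two scans into a single pass (return on exact hit, record first normalized hit): an alternative one-pass decomposition, same result.
-- ===== PORT A =====
def pvNormWS (s : String) : String := PySem.Str.join " " (PySem.Str.split₀ s)

-- pass 1 of A: first i in the range with an exact slice match (none = loop fell through)
def pvPassExact (haystack needle : List String) : List Int → Option Int
  | [] => none
  | i :: t =>
    if PySem.List.slice haystack (some i) (some (i + (needle.length : Int))) = needle then some i
    else pvPassExact haystack needle t

-- pass 2 of A: first i whose window, normalized element-wise, matches norm_needle
def pvPassNorm (haystack : List String) (m : Int) (normNeedle : List String) : List Int → Option Int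
  | [] => none
  | i :: t =>
    if (PySem.List.slice haystack (some i) (some (i + m))).map pvNormWS = normNeedle then some i
    else pvPassNorm haystack m normNeedle t

def find_subsequence_py (haystack : List String) (needle : List String) (start_idx : Int) : Int :=
  if needle = [] then min (max start_idx 0) (haystack.length : Int)
  else
    let maxStart : Int := (haystack.length : Int) - (needle.length : Int)
    let r := PySem.List.pyRange (max start_idx 0) (maxStart + 1) 1
    match pvPassExact haystack needle r with
    | some i => i
    | none =>
      let normNeedle := needle.map pvNormWS
      match pvPassNorm haystack (needle.length : Int) normNeedle r with
      | some i => i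
      | none => -1

-- ===== PORT B =====
-- B's single loop: return i on exact match, else record the first normalized match in firstNorm
def pvGoB (haystack needle normHay normNeedle : List String) (m : Int) :
    List Int → Int → Int
  | [], firstNorm => firstNorm
  | i :: t, firstNorm =>
    if PySem.List.slice haystack (some i) (some (i + m)) = needle then i
    else pvGoB haystack needle normHay normNeedle m t
      (if firstNorm < 0 ∧ PySem.List.slice normHay (some i) (some (i + m)) = normNeedle then i
       else firstNorm)

def find_subsequence_py_alt (haystack : List String) (needle : List String) (start_idx : Int) : Int :=
  if needle = [] then min (max start_idx 0) (haystack.length : Int)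
  else
    let m : Int := (needle.length : Int)
    let normNeedle := needle.map pvNormWS
    let normHay := haystack.map pvNormWS
    pvGoB haystack needle normHay normNeedle m
      (PySem.List.pyRange (max start_idx 0) ((haystack.length : Int) - m + 1) 1) (-1)

-- ===== PRECONDITION & SPEC =====
def Spec_find_subsequence_py (haystack : List String) (needle : List String) (start_idx : Int) (out : Int) : Prop := out = find_subsequence_py_alt haystack needle start_idx
instance (haystack : List String) (needle : List String) (start_idx : Int) (out : Int) : Decidable (Spec_find_subsequence_py haystack needle start_idx out) := by unfold Spec_find_subsequence_py; infer_instance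

-- ===== CLAIM (what is proved, stated in full; the proofs are below) =====
def Claim_equal_find_subsequence_py : Prop := ∀ (haystack : List String) (needle : List String) (start_idx : Int), Dom_find_subsequence_py haystack needle start_idx → Spec_find_subsequence_py haystack needle start_idx (find_subsequence_py haystack needle start_idx)

-- ===== LEMMAS AND PROOFS =====

-- A's pass 1 with the slice length written via m (purely notational: m := needle.length)
def pvPassExact' (haystack needle : List String) (m : Int) : List Int → Option Int
  | [] => none
  | i :: t =>
    if PySem.List.slice haystack (some i) (some (i + m)) = needle then some i
    else pvPassExact' haystack needle m t

-- first normalized match over the B-side data (option form of A's pass 2, reading normHay)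
def pvPassNorm' (normHay : List String) (m : Int) (normNeedle : List String) : List Int → Option Int
  | [] => none
  | i :: t =>
    if PySem.List.slice normHay (some i) (some (i + m)) = normNeedle then some i
    else pvPassNorm' normHay m normNeedle t

-- map commutes with Python slicing (map preserves length, so the clamping agrees)
theorem pv_map_slice {α β : Type} (f : α → β) (xs : List α) (a b : Int) :
    (PySem.List.slice xs (some a) (some b)).map f
      = PySem.List.slice (xs.map f) (some a) (some b) := by
  simp [PySem.List.slice, List.map_drop, List.map_take]

theorem pv_passExact_eq (haystack needle : List String) (r : List Int) :
    pvPassExact haystack needle r = pvPassExact' haystack needle (needle.length : Int) r := by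
  induction r with
  | nil => rfl
  | cons i t ih => simp only [pvPassExact, pvPassExact', ih]

-- B's normalized-window test equals A's (normalize the slice = slice the normalized list)
theorem pv_passNorm_eq (haystack normNeedle : List String) (m : Int) (r : List Int) :
    pvPassNorm haystack m normNeedle r
      = pvPassNorm' (haystack.map pvNormWS) m normNeedle r := by
  induction r with
  | nil => rfl
  | cons i t ih => simp only [pvPassNorm, pvPassNorm', pv_map_slice, ih]

-- loop invariant: the combined pass equals exact-first-then-normalized, with the accumulator
-- standing for an already-found normalized match (all range elements are ≥ 0)
theorem pv_goB_eq (haystack needle normHay normNeedle : List String) (m : Int)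
    (r : List Int) (acc : Int) (hr : ∀ i ∈ r, 0 ≤ i) (hacc0 : acc < 0 → acc = -1) :
    pvGoB haystack needle normHay normNeedle m r acc
      = match pvPassExact' haystack needle m r with
        | some i => i
        | none =>
          if acc < 0 then (pvPassNorm' normHay m normNeedle r).getD (-1) else acc := by
  induction r generalizing acc with
  | nil =>
      simp only [pvGoB, pvPassExact', pvPassNorm']
      split_ifs with h
      · simp [hacc0 h]
      · rfl
  | cons i t ih =>
      have hi : 0 ≤ i := hr i (by simp)
      have ht : ∀ j ∈ t, 0 ≤ j := fun j hj => hr j (by simp [hj])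
      by_cases hE : PySem.List.slice haystack (some i) (some (i + m)) = needle
      · simp [pvGoB, pvPassExact', hE]
      · by_cases hacc : acc < 0
        · by_cases hN : PySem.List.slice normHay (some i) (some (i + m)) = normNeedle
          · have hi' : ¬ i < 0 := by omega
            simp [pvGoB, pvPassExact', pvPassNorm', hE, hacc, hN,
              ih _ ht (fun h => absurd h hi'), hi']
          · simp [pvGoB, pvPassExact', pvPassNorm', hE, hacc, hN, ih _ ht hacc0]
        · simp [pvGoB, pvPassExact', hE, hacc, ih _ ht hacc0]

-- ===== VERDICT (by name: the statement is the Claim_ definition above) =====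
theorem find_subsequence_py_spec : Claim_equal_find_subsequence_py := by
  intro haystack needle start_idx _
  unfold Spec_find_subsequence_py find_subsequence_py find_subsequence_py_alt
  by_cases hn : needle = []
  · simp [hn]
  · simp only [hn, if_false]
    have hr : ∀ i ∈ PySem.List.pyRange (max start_idx 0)
        ((haystack.length : Int) - (needle.length : Int) + 1) 1, 0 ≤ i := by
      intro i hi
      have := (PySem.List.mem_pyRange_one.mp hi).1
      omega
    rw [pv_goB_eq _ _ _ _ _ _ _ hr (fun _ => rfl), pv_passExact_eq, pv_passNorm_eq]
    cases pvPassExact' haystack needle (needle.length : Int) _ with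
    | some i => rfl
    | none =>
        cases pvPassNorm' (haystack.map pvNormWS) (needle.length : Int) (needle.map pvNormWS) _ with
        | some j => simp
        | none => simp
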